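-- pv_equiv track=rewrite | github.com/Ignia707/DSA-with-python | Striver Path/Basics/basic_math/divisors.py | print_divisors_opt
-- ===== SOURCE A (Python) =====
-- import math
--
-- def print_divisors_opt(n):
--     divisors = []
--
--     for i in range(1, math.isqrt(n) + 1):
--         if n % i == 0:
--             divisors.append(i)
--             if n != n // i:
--                 divisors.append(n // i)
--
--     return sorted(divisors)
-- ===== SOURCE B (Python) =====
-- import math
--
-- def print_divisors_opt(n):
--     acc = []
--     for i in range(math.isqrt(n), 0, -1):
--         if n % i == 0:
--             q = n // i
--             acc = [i] + acc + ([q] if q != n else [])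
--     return acc
-- ===== Notes on version B (the rewrite author's own statement) =====
-- stated objective: alternative
-- what changed: B iterates i downward from isqrt(n) to 1 keeping a single 'sandwich' accumulator acc = [i] + acc + [n//i], which is sorted by construction, so the pair-append list and the final sorted() call of A disappear.
import Mathlib
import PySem

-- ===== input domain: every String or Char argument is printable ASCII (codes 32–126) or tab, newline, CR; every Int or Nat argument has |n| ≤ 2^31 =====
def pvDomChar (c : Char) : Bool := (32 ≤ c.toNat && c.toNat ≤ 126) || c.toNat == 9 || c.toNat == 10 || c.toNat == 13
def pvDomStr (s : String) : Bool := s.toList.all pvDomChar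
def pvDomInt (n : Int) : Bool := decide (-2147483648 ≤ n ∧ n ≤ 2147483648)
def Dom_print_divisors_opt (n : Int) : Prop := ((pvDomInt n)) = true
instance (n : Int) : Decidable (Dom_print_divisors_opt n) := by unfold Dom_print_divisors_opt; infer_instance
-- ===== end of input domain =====

-- B runs the same divisibility test but iterates DOWNWARD from isqrt(n) with a single 'sandwich'
-- accumulator acc := [i] ++ acc ++ [n//i], sorted by construction: no pair list, no final sort.

-- ===== PORT A =====
-- math.isqrt(n) for n ≥ 0 is exactly Int.sqrt; n < 0 raises ValueError and is excluded by Pre_.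
def print_divisors_opt (n : Int) : List Int :=
  let divisors : List Int :=
    (PySem.List.pyRange 1 (Int.sqrt n + 1) 1).foldl
      (fun divisors i =>
        if PySem.Int.mod n i = 0 then
          let divisors := divisors ++ [i]
          if n ≠ PySem.Int.floordiv n i then divisors ++ [PySem.Int.floordiv n i]
          else divisors
        else divisors) []
  PySem.List.sorted divisors (fun x => x) false

-- ===== PORT B =====
def print_divisors_opt_alt (n : Int) : List Int :=
  (PySem.List.pyRange (Int.sqrt n) 0 (-1)).foldl
    (fun acc i =>
      if PySem.Int.mod n i = 0 then
        let q := PySem.Int.floordiv n i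
        [i] ++ acc ++ (if q ≠ n then [q] else [])
      else acc) []

-- ===== PRECONDITION & SPEC =====
-- Pre_: math.isqrt raises ValueError for negative n (both A and B raise there).
def Pre_print_divisors_opt (n : Int) : Prop := 0 ≤ n
instance (n : Int) : Decidable (Pre_print_divisors_opt n) := by unfold Pre_print_divisors_opt; infer_instance
def pvWitness_print_divisors_opt : Int := 12

def Spec_print_divisors_opt (n : Int) (out : List Int) : Prop := out = print_divisors_opt_alt n
instance (n : Int) (out : List Int) : Decidable (Spec_print_divisors_opt n out) := by unfold Spec_print_divisors_opt; infer_instance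

-- ===== CLAIM (what is proved, stated in full; the proofs are below) =====
def Claim_equal_print_divisors_opt : Prop := ∀ (n : Int), Dom_print_divisors_opt n → Pre_print_divisors_opt n → Spec_print_divisors_opt n (print_divisors_opt n)

-- ===== LEMMAS AND PROOFS =====

-- the two Bool tests of the loop bodies, and the cofactor map
def pvC1 (n i : Int) : Bool := decide (PySem.Int.mod n i = 0)
def pvC2 (n i : Int) : Bool := decide (PySem.Int.mod n i = 0 ∧ PySem.Int.floordiv n i ≠ n)
def pvF (n i : Int) : Int := PySem.Int.floordiv n i

-- A's loop body appends, per i, the block [i]?, [n//i]?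
theorem pvA_flatMap (n : Int) : print_divisors_opt n =
    PySem.List.sorted ((PySem.List.pyRange 1 (Int.sqrt n + 1) 1).flatMap
      (fun i => (if pvC1 n i then [i] else []) ++ (if pvC2 n i then [pvF n i] else [])))
      (fun x => x) false := by
  unfold print_divisors_opt
  have hfun : (fun (divisors : List Int) (i : Int) =>
        if PySem.Int.mod n i = 0 then
          let divisors := divisors ++ [i]
          if n ≠ PySem.Int.floordiv n i then divisors ++ [PySem.Int.floordiv n i]
          else divisors
        else divisors)
      = (fun (acc : List Int) (i : Int) =>
          acc ++ ((if pvC1 n i then [i] else []) ++ (if pvC2 n i then [pvF n i] else []))) := by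
    funext acc i
    by_cases h1 : PySem.Int.mod n i = 0 <;> by_cases h2 : PySem.Int.floordiv n i = n <;>
      simp [pvC1, pvC2, pvF, h1, h2, Ne.symm]
  rw [hfun, PySem.List.foldl_append_eq_flatMap]
  simp

-- B's loop step: sandwich the accumulator between this i's block pair
def pvStep (n : Int) (acc : List Int) (i : Int) : List Int :=
  if PySem.Int.mod n i = 0 then
    [i] ++ acc ++ (if PySem.Int.floordiv n i ≠ n then [PySem.Int.floordiv n i] else [])
  else acc

theorem pvB_fold (n : Int) (l : List Int) (acc : List Int) :
    l.foldl (pvStep n) acc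
    = l.reverse.filter (pvC1 n) ++ acc ++ (l.filter (pvC2 n)).map (pvF n) := by
  induction l generalizing acc with
  | nil => simp
  | cons x l ih =>
    rw [List.foldl_cons, ih]
    have hx : pvStep n acc x
        = (if pvC1 n x then [x] else []) ++ acc ++ (if pvC2 n x then [pvF n x] else []) := by
      by_cases h1 : PySem.Int.mod n x = 0 <;> by_cases h2 : PySem.Int.floordiv n x ≠ n <;>
        simp [pvStep, pvC1, pvC2, pvF, h1, h2]
    rw [hx]
    by_cases h1 : pvC1 n x <;> by_cases h2 : pvC2 n x <;>
      simp [h1, h2, List.filter_append]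

theorem pvB_eq (n : Int) : print_divisors_opt_alt n =
    (PySem.List.pyRange 1 (Int.sqrt n + 1) 1).filter (pvC1 n)
      ++ (((PySem.List.pyRange 1 (Int.sqrt n + 1) 1).filter (pvC2 n)).map (pvF n)).reverse := by
  have h : print_divisors_opt_alt n
      = (PySem.List.pyRange (Int.sqrt n) 0 (-1)).foldl (pvStep n) [] := by
    unfold print_divisors_opt_alt pvStep
    rfl
  rw [h, PySem.List.pyRange_neg_one_eq_reverse, pvB_fold]
  simp [List.filter_reverse, List.map_reverse]

-- interleaving permutation: filter + mapped filter is a rearrangement of the per-element blocks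
theorem pvInterleave {α : Type} [DecidableEq α] (l : List α) (c1 c2 : α → Bool) (f : α → α) :
    (l.filter c1 ++ (l.filter c2).map f).Perm
      (l.flatMap (fun i => (if c1 i then [i] else []) ++ (if c2 i then [f i] else []))) := by
  induction l with
  | nil => simp
  | cons x l ih =>
    have e1 : (x :: l).filter c1 = (if c1 x then [x] else []) ++ l.filter c1 := by
      by_cases h : c1 x <;> simp [h]
    have e2 : ((x :: l).filter c2).map f = (if c2 x then [f x] else []) ++ (l.filter c2).map f := by
      by_cases h : c2 x <;> simp [h]
    rw [e1, e2, List.flatMap_cons]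
    have p1 : (((if c1 x then [x] else []) ++ l.filter c1)
          ++ ((if c2 x then [f x] else []) ++ (l.filter c2).map f)).Perm
        (((if c1 x then [x] else []) ++ (if c2 x then [f x] else []))
          ++ (l.filter c1 ++ (l.filter c2).map f)) := by
      refine List.perm_iff_count.2 (fun a => ?_)
      simp only [List.count_append]
      ring
    exact p1.trans (ih.append_left _)

-- floor division by a positive divisor is antitone in the divisor (nonnegative dividend)
theorem pvDivAnti (n a b : Int) (hn : 0 ≤ n) (ha : 0 < a) (hab : a ≤ b) : n / b ≤ n / a := by
  have hb : 0 < b := lt_of_lt_of_le ha hab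
  rw [Int.le_ediv_iff_mul_le ha]
  have h1 : n / b * b ≤ n := Int.ediv_mul_le n hb.ne'
  have h2 : 0 ≤ n / b := Int.ediv_nonneg hn hb.le
  nlinarith

-- r*r ≤ n for r = Int.sqrt n, 0 ≤ n
theorem pvSqrtSq (n : Int) (hn : 0 ≤ n) : Int.sqrt n * Int.sqrt n ≤ n := by
  have h := Nat.sqrt_le n.toNat
  have : ((Nat.sqrt n.toNat * Nat.sqrt n.toNat : Nat) : Int) ≤ ((n.toNat : Nat) : Int) := by
    exact_mod_cast h
  simpa [Int.sqrt, Int.toNat_of_nonneg hn] using this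

-- the main ordering + permutation argument
theorem pvMain (n : Int) (hn : 0 ≤ n) : print_divisors_opt n = print_divisors_opt_alt n := by
  rw [pvA_flatMap, pvB_eq]
  set r := Int.sqrt n with hr
  set R := PySem.List.pyRange 1 (r + 1) 1 with hR
  have hmem : ∀ i ∈ R, 1 ≤ i ∧ i ≤ r := by
    intro i hi
    have := (PySem.List.mem_pyRange_one).1 hi
    omega
  have hfd : ∀ i ∈ R, PySem.Int.floordiv n i = n / i := fun i hi =>
    PySem.Int.floordiv_eq_ediv_of_pos (by have := hmem i hi; omega)
  have hrr : r * r ≤ n := pvSqrtSq n hn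
  have hsmall_le : ∀ i ∈ R, i ≤ r := fun i hi => (hmem i hi).2
  have hlarge_ge : ∀ i ∈ R, r ≤ n / i := by
    intro i hi
    obtain ⟨h1, h2⟩ := hmem i hi
    rw [Int.le_ediv_iff_mul_le (by omega)]
    nlinarith
  apply PySem.List.sorted_id_eq_of_perm_of_pairwise _ _ ?_ ?_
  · refine List.Perm.trans ?_ (pvInterleave R (pvC1 n) (pvC2 n) (pvF n))
    exact (List.reverse_perm _).append_left _
  · rw [List.pairwise_append]
    refine ⟨?_, ?_, ?_⟩
    · exact ((PySem.List.pairwise_lt_pyRange_one 1 (r+1)).filter _).imp Int.le_of_lt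
    · rw [List.pairwise_reverse, List.pairwise_map]
      have hp : (R.filter (pvC2 n)).Pairwise (· < ·) :=
        (PySem.List.pairwise_lt_pyRange_one 1 (r+1)).filter _
      refine List.Pairwise.imp_of_mem (fun {a b} ha hb hab => ?_) hp
      have haR : a ∈ R := List.mem_of_mem_filter ha
      have hbR : b ∈ R := List.mem_of_mem_filter hb
      show pvF n b ≤ pvF n a
      rw [pvF, pvF, hfd a haR, hfd b hbR]
      exact pvDivAnti n a b hn (by have := hmem a haR; omega) hab.le
    · intro a ha b hb
      have haR : a ∈ R := List.mem_of_mem_filter ha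
      rw [List.mem_reverse, List.mem_map] at hb
      obtain ⟨i, hi, rfl⟩ := hb
      have hiR : i ∈ R := List.mem_of_mem_filter hi
      have : pvF n i = n / i := by rw [pvF, hfd i hiR]
      rw [this]
      exact le_trans (hsmall_le a haR) (hlarge_ge i hiR)

-- ===== VERDICT (by name: the statement is the Claim_ definition above) =====
theorem print_divisors_opt_spec : Claim_equal_print_divisors_opt := by
  intro n _ hpre
  unfold Spec_print_divisors_opt
  exact pvMain n hpre
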